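-- pv_equiv track=rewrite | github.com/Omortis/hw502 | lec6-live/ex6.py | bruteForceReverse
-- ===== SOURCE A (Python) =====
-- def bruteForceReverse(inc):
--
--     returnList = []
--
--     for i in range(len(inc)):
--
--         # shallow copy
--         local = inc[:]
--         rev = inc[:]
--
--         returnList.append(local)
--         rev.reverse()
--         returnList.append(rev)
--
--         current = inc[0]
--
--         inc.pop(0)
--         shiftList = inc[:]  # copy, not assign ref
--         shiftList.append(current)
--         inc = shiftList[:]
--
--     return returnList
-- ===== SOURCE B (Python) =====
-- # Return-value equivalent of A via direct slicing: rotation i is inc[i:]+inc[:i].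
-- # NOTE: A mutates the caller's list (its first element is popped once when non-empty);
-- # B does not mutate; the equivalence claimed is about the RETURN VALUE only.
-- def bruteForceReverse(inc):
--     out = []
--     for i in range(len(inc)):
--         rot = inc[i:] + inc[:i]
--         out += [rot, rot[::-1]]
--     return out
-- ===== Notes on version B (the rewrite author's own statement) =====
-- stated objective: simpler
-- what changed: Each rotation is computed directly by index slicing inc[i:]+inc[:i] instead of threading an incrementally pop-and-append rotated working copy through the loop; B also does not mutate the caller's list (A pops its first element once), the equivalence is about the return value.
import Mathlib
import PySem

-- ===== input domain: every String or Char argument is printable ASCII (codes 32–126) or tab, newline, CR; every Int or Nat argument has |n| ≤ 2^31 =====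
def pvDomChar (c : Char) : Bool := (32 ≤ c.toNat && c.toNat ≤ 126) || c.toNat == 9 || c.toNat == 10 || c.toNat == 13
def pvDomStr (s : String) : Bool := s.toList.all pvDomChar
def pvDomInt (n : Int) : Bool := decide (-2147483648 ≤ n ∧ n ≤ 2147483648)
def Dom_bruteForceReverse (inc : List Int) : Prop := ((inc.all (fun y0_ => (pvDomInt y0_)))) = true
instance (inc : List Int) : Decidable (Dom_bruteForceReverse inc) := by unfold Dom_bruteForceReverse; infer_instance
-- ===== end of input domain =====

-- B computes each rotation directly by slicing instead of threading a rotated working copy;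
-- A additionally mutates the caller's list (pops its first element once when non-empty),
-- B does not: the equivalence proved is about the RETURN value only. Objective: simpler.


-- ===== PORT A =====
-- the `for i in range(len(inc))` loop: i is unused, so it is a countdown from len(inc);
-- `current = inc[0]; inc.pop(0); …append(current)` rotates the working copy left by one
-- (the loop body is reached only with a non-empty copy, so the [] branch is unreachable).
def pvBruteLoopA : Nat → List Int → List (List Int)
  | 0, _ => []
  | k+1, cur =>
      cur :: cur.reverse ::
        pvBruteLoopA k (match cur with | [] => [] | h :: t => t ++ [h])

def bruteForceReverse (inc : List Int) : List (List Int) :=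
  pvBruteLoopA inc.length inc

-- ===== PORT B =====
-- slices inc[i:] and inc[:i] with 0 ≤ i ≤ len(inc) are exactly drop i / take i
def bruteForceReverse_alt (inc : List Int) : List (List Int) :=
  (List.range inc.length).flatMap (fun i =>
    let rot := inc.drop i ++ inc.take i
    [rot, rot.reverse])

-- ===== PRECONDITION & SPEC =====
def Spec_bruteForceReverse (inc : List Int) (out : List (List Int)) : Prop := out = bruteForceReverse_alt inc
instance (inc : List Int) (out : List (List Int)) : Decidable (Spec_bruteForceReverse inc out) := by unfold Spec_bruteForceReverse; infer_instance

-- ===== CLAIM (what is proved, stated in full; the proofs are below) =====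
def Claim_equal_bruteForceReverse : Prop := ∀ (inc : List Int), Dom_bruteForceReverse inc → Spec_bruteForceReverse inc (bruteForceReverse inc)

-- ===== LEMMAS AND PROOFS =====

-- one rotation step: left-rotating (drop i ++ take i) gives (drop (i+1) ++ take (i+1))
lemma pvRotStep (inc : List Int) (i : Nat) (hi : i < inc.length) :
    (match inc.drop i ++ inc.take i with
      | [] => ([] : List Int)
      | h :: t => t ++ [h]) = inc.drop (i+1) ++ inc.take (i+1) := by
  have hd : inc.drop i = inc[i] :: inc.drop (i+1) := List.drop_eq_getElem_cons hi
  have ht : inc.take (i+1) = inc.take i ++ [inc[i]] := by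
    simpa using List.take_succ (l := inc) (n := i)
  have hsc : inc.drop i ++ inc.take i = inc[i] :: (inc.drop (i+1) ++ inc.take i) := by
    rw [hd, List.cons_append]
  rw [hsc, ht]
  simp

lemma pvLoopA_eq (inc : List Int) :
    ∀ (k i : Nat), i + k = inc.length →
    pvBruteLoopA k (inc.drop i ++ inc.take i) =
      (List.range' i k).flatMap (fun j =>
        let rot := inc.drop j ++ inc.take j
        [rot, rot.reverse]) := by
  intro k
  induction k with
  | zero => intro i _; simp [pvBruteLoopA]
  | succ k ih =>
      intro i h
      have hi : i < inc.length := by omega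
      rw [show pvBruteLoopA (k+1) (inc.drop i ++ inc.take i) =
          (inc.drop i ++ inc.take i) :: (inc.drop i ++ inc.take i).reverse ::
            pvBruteLoopA k (match inc.drop i ++ inc.take i with | [] => [] | h :: t => t ++ [h]) from rfl,
        pvRotStep inc i hi, ih (i+1) (by omega)]
      simp [List.range'_succ]

-- ===== VERDICT (by name: the statement is the Claim_ definition above) =====
theorem bruteForceReverse_spec : Claim_equal_bruteForceReverse := by
  intro inc _
  unfold Spec_bruteForceReverse bruteForceReverse bruteForceReverse_alt
  have := pvLoopA_eq inc inc.length 0 (by omega)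
  simpa [List.range_eq_range'] using this
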